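-- pv_equiv track=rewrite | github.com/samarthaadi/DL_MoE | data.py | _flat_ner_to_bio
-- ===== SOURCE A (Python) =====
-- def _flat_ner_to_bio(labels):
--     """Convert flat NER type labels to BIO format.
--     Consecutive tokens of the same type → same span (B- then I-).
--     'X' → 'O'.
--     """
--     bio, prev = [], None
--     for lab in labels:
--         if lab == "X":
--             bio.append("O")
--             prev = None
--         elif lab == prev:
--             bio.append(f"I-{lab}")
--         else:
--             bio.append(f"B-{lab}")
--             prev = lab
--     return bio
-- ===== SOURCE B (Python) =====
-- from itertools import groupby
--
-- def _flat_ner_to_bio(labels):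
--     """Convert flat NER type labels to BIO format via maximal runs of equal labels."""
--     bio = []
--     for key, group in groupby(labels):
--         n = len(list(group))
--         if key == "X":
--             bio.extend(["O"] * n)
--         else:
--             bio.append(f"B-{key}")
--             bio.extend([f"I-{key}"] * (n - 1))
--     return bio
-- ===== Notes on version B (the rewrite author's own statement) =====
-- stated objective: idiomatic
-- what changed: Replaces the stateful prev-tracking loop by an itertools.groupby run decomposition: each maximal run of equal labels is emitted at once (O-run for 'X', else B- head plus I- tail).
import Mathlib
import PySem

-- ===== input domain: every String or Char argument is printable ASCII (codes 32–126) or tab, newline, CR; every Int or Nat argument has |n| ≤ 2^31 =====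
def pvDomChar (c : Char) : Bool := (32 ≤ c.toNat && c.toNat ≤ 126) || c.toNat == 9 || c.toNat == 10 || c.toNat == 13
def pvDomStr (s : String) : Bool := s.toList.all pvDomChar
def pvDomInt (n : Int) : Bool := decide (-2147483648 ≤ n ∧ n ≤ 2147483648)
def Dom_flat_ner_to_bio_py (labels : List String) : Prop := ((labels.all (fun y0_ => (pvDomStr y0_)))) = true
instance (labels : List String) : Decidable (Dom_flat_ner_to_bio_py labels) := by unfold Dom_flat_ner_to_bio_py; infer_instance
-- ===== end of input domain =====

-- B replaces A's stateful prev-tracking loop by a run-based (groupby-style) decomposition; objective: idiomatic.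

-- ===== PORT A =====
-- literal port of A's loop body: state = (bio, prev)
def stepA (st : List String × Option String) (lab : String) : List String × Option String :=
  if lab == "X" then (st.1 ++ ["O"], none)
  else if some lab == st.2 then (st.1 ++ ["I-" ++ lab], st.2)
  else (st.1 ++ ["B-" ++ lab], some lab)

def flat_ner_to_bio_py (labels : List String) : List String :=
  (labels.foldl stepA ([], none)).1

-- ===== PORT B =====
-- port of Source B: split labels into maximal runs of equal labels, emit each run at once
def flat_ner_to_bio_py_alt (labels : List String) : List String :=
  match labels with
  | [] => []
  | l :: ls =>
    let run := ls.takeWhile (· == l)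
    (if l == "X" then List.replicate (run.length + 1) "O"
     else ("B-" ++ l) :: List.replicate run.length ("I-" ++ l))
      ++ flat_ner_to_bio_py_alt (ls.dropWhile (· == l))
  termination_by labels.length
  decreasing_by
    simp only [List.length_cons]
    exact Nat.lt_succ_of_le (List.length_dropWhile_le _ _)

-- ===== PRECONDITION & SPEC =====
def Spec_flat_ner_to_bio_py (labels : List String) (out : List String) : Prop := out = flat_ner_to_bio_py_alt labels
instance (labels : List String) (out : List String) : Decidable (Spec_flat_ner_to_bio_py labels out) := by unfold Spec_flat_ner_to_bio_py; infer_instance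

-- ===== CLAIM (what is proved, stated in full; the proofs are below) =====
def Claim_equal_flat_ner_to_bio_py : Prop := ∀ (labels : List String), Dom_flat_ner_to_bio_py labels → Spec_flat_ner_to_bio_py labels (flat_ner_to_bio_py labels)

-- ===== LEMMAS AND PROOFS =====

-- A's loop as a straight recursion on (prev, labels)
def goA (prev : Option String) : List String → List String
  | [] => []
  | l :: ls =>
    if l == "X" then "O" :: goA none ls
    else if some l == prev then ("I-" ++ l) :: goA prev ls
    else ("B-" ++ l) :: goA (some l) ls

theorem foldl_eq_goA (ls : List String) (acc : List String) (prev : Option String) :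
    (ls.foldl stepA (acc, prev)).1 = acc ++ goA prev ls := by
  induction ls generalizing acc prev with
  | nil => simp [goA]
  | cons l ls ih =>
    simp only [List.foldl_cons]
    by_cases h1 : l == "X"
    · rw [show stepA (acc, prev) l = (acc ++ ["O"], none) from by simp [stepA, h1], ih]
      simp [goA, h1]
    · by_cases h2 : some l == prev
      · rw [show stepA (acc, prev) l = (acc ++ ["I-" ++ l], prev) from by simp [stepA, h1, h2], ih]
        simp [goA, h1, h2]
      · rw [show stepA (acc, prev) l = (acc ++ ["B-" ++ l], some l) from by
            simp [stepA, h1, h2], ih]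
        simp [goA, h1, h2]

-- a run of "X"s at the front all become "O", with prev = none throughout
theorem goA_none_X_run (ls : List String) :
    goA none ls = (ls.takeWhile (· == "X")).map (fun _ => "O")
      ++ goA none (ls.dropWhile (· == "X")) := by
  induction ls with
  | nil => simp
  | cons x xs ih =>
    by_cases hx : x == "X"
    · simp [goA, hx, ih]
    · simp [hx]

-- resuming with prev = some l, the leading run of l's becomes I-, after which prev is irrelevant
theorem goA_some_run (l : String) (hl : ¬ (l == "X") = true) (ls : List String) :
    goA (some l) ls = (ls.takeWhile (· == l)).map (fun _ => "I-" ++ l)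
      ++ goA none (ls.dropWhile (· == l)) := by
  induction ls with
  | nil => simp [goA]
  | cons x xs ih =>
    by_cases hx : x == l
    · have hxl : x = l := by simpa using hx
      subst hxl
      simp [goA, hl, ih]
    · simp only [List.takeWhile_cons, List.dropWhile_cons, hx, Bool.false_eq_true,
        if_false, List.map_nil, List.nil_append]
      by_cases hxX : x == "X"
      · simp [goA, hxX]
      · have hne : ¬ (some x == some l) = true := by simpa using hx
        simp [goA, hxX, hne]

theorem map_const_replicate {α : Type} (ls : List α) (s : String) :
    ls.map (fun _ => s) = List.replicate ls.length s := by
  induction ls with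
  | nil => rfl
  | cons x xs ih => simp [List.replicate_succ, ih]

theorem goA_none_eq_alt (labels : List String) :
    goA none labels = flat_ner_to_bio_py_alt labels := by
  induction labels using flat_ner_to_bio_py_alt.induct with
  | case1 => simp [flat_ner_to_bio_py_alt, goA]
  | case2 l ls ih =>
    rw [flat_ner_to_bio_py_alt]
    by_cases hl : l == "X"
    · have hlX : l = "X" := by simpa using hl
      subst hlX
      simp only [goA, hl, if_pos, ← ih]
      rw [goA_none_X_run ls, map_const_replicate]
      simp [List.replicate_succ]
    · have hnp : ¬ (some l == (none : Option String)) = true := by simp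
      simp only [goA, hl, Bool.false_eq_true, if_false, hnp, ← ih]
      rw [goA_some_run l hl ls, map_const_replicate]
      simp

-- ===== VERDICT (by name: the statement is the Claim_ definition above) =====
theorem flat_ner_to_bio_py_spec : Claim_equal_flat_ner_to_bio_py := by
  intro labels _
  unfold Spec_flat_ner_to_bio_py flat_ner_to_bio_py
  rw [foldl_eq_goA, List.nil_append, goA_none_eq_alt]
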